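-- pv_equiv track=rewrite | github.com/Nikku03/enzyme_Software | src/enzyme_software/modules/module2_active_site_refinement.py | _pick_residue
-- ===== SOURCE A (Python) =====
-- from typing import Any, Dict, List, Optional
--
-- def _pick_residue(residues: List[str], preferred_prefixes: List[str]) -> Optional[str]:
--     if not residues:
--         return None
--     for prefix in preferred_prefixes:
--         for residue in residues:
--             if residue.lower().startswith(prefix.lower()):
--                 return residue
--     return residues[0]
-- ===== SOURCE B (Python) =====
-- def _pick_residue(residues, preferred_prefixes):
--     if not residues:
--         return None
--     n = len(preferred_prefixes)
--
--     def key(residue):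
--         rl = residue.lower()
--         for i, prefix in enumerate(preferred_prefixes):
--             if rl.startswith(prefix.lower()):
--                 return i
--         return n
--
--     return min(residues, key=key)
-- ===== Notes on version B (the rewrite author's own statement) =====
-- stated objective: simpler
-- what changed: Replaces the nested prefix-by-prefix rescans of the residue list with a single stable min over residues keyed by the index of the first matching prefix (sentinel len(prefixes) reproduces the residues[0] fallback).
import Mathlib
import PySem

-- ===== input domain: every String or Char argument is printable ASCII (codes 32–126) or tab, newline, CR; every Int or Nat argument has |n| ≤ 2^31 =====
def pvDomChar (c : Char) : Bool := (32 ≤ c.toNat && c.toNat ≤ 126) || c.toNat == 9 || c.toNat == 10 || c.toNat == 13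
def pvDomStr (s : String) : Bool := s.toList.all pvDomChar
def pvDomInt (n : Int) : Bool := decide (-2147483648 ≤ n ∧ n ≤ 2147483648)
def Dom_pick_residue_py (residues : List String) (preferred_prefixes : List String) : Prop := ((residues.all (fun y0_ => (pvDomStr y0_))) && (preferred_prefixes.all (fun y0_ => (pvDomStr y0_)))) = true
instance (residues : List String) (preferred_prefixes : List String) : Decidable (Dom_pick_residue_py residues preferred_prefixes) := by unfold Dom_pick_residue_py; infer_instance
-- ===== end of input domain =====

-- B replaces A's prefix-by-prefix rescans of the residue list with one stable min
-- over residues keyed by the index of the first matching prefix (simpler decomposition).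


-- ===== PORT A =====
-- inner 'for residue in residues: if residue.lower().startswith(prefix.lower()): return residue'
def pickInner (p : String) : List String → Option String
  | [] => none
  | r :: rs =>
    if PySem.Str.startswith (PySem.Str.lower r) (PySem.Str.lower p) then some r
    else pickInner p rs

-- outer 'for prefix in preferred_prefixes: …'
def pickOuter (residues : List String) : List String → Option String
  | [] => none
  | p :: ps =>
    match pickInner p residues with
    | some r => some r
    | none => pickOuter residues ps

def pick_residue_py (residues : List String) (preferred_prefixes : List String) : Option String :=
  match residues with
  | [] => none
  | r0 :: _ =>
    match pickOuter residues preferred_prefixes with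
    | some r => some r
    | none => some r0

-- ===== PORT B =====
-- key(residue) = index of the first (pre-lowered) prefix the residue's lowercase startswith,
-- or len(lowered) if none matches
def pickKey (lowered : List String) (residue : String) : Nat :=
  let rl := PySem.Str.lower residue
  match lowered.findIdx? (fun lp => PySem.Str.startswith rl lp) with
  | some i => i
  | none => lowered.length

def pick_residue_py_alt (residues : List String) (preferred_prefixes : List String) : Option String :=
  match residues with
  | [] => none
  | _ :: _ =>
    let lowered := preferred_prefixes.map PySem.Str.lower
    PySem.List.min? residues (pickKey lowered)

-- ===== PRECONDITION & SPEC =====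
def Spec_pick_residue_py (residues : List String) (preferred_prefixes : List String) (out : Option String) : Prop := out = pick_residue_py_alt residues preferred_prefixes
instance (residues : List String) (preferred_prefixes : List String) (out : Option String) : Decidable (Spec_pick_residue_py residues preferred_prefixes out) := by unfold Spec_pick_residue_py; infer_instance

-- ===== CLAIM (what is proved, stated in full; the proofs are below) =====
def Claim_equal_pick_residue_py : Prop := ∀ (residues : List String) (preferred_prefixes : List String), Dom_pick_residue_py residues preferred_prefixes → Spec_pick_residue_py residues preferred_prefixes (pick_residue_py residues preferred_prefixes)

-- ===== LEMMAS AND PROOFS =====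

-- min?'s fold step, abbreviated
def mstep (k : String → Nat) (acc : Option String) (x : String) : Option String :=
  match acc with
  | none => some x
  | some m => if k x < k m then some x else some m

lemma min?_eq_foldl (xs : List String) (k : String → Nat) :
    PySem.List.min? xs k = xs.foldl (mstep k) none := by
  unfold PySem.List.min?
  congr 1
  funext acc x
  cases acc <;> rfl

-- once the accumulator holds a zero-key element, it never changes
lemma foldl_stay0 (k : String → Nat) (t : List String) (m : String) (hm : k m = 0) :
    t.foldl (mstep k) (some m) = some m := by
  induction t with
  | nil => rfl
  | cons x t ih =>
    have hst : mstep k (some m) x = some m := by simp [mstep, hm]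
    rw [List.foldl_cons, hst, ih]

-- the first zero-key element wins, whatever nonzero-key accumulator we start from
lemma foldl_firstZero (k : String → Nat) (t : List String) (r : String)
    (hr : t.find? (fun x => k x == 0) = some r) :
    ∀ m, k m ≠ 0 → t.foldl (mstep k) (some m) = some r := by
  induction t with
  | nil => simp at hr
  | cons x t ih =>
    intro m hm
    by_cases hx : k x = 0
    · have hrx : x = r := by simpa [List.find?_cons, hx] using hr
      have hst : mstep k (some m) x = some x := by
        simp only [mstep]
        rw [if_pos (by omega)]
      rw [List.foldl_cons, hst, foldl_stay0 k t x hx, hrx]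
    · have hr' : t.find? (fun x => k x == 0) = some r := by
        simpa [List.find?_cons, hx] using hr
      rw [List.foldl_cons]
      simp only [mstep]
      split
      · exact ih hr' x hx
      · exact ih hr' m hm

-- min? returns the first zero-key element when one exists
lemma min?_firstZero (k : String → Nat) (xs : List String) (r : String)
    (hr : xs.find? (fun x => k x == 0) = some r) :
    PySem.List.min? xs k = some r := by
  cases xs with
  | nil => simp at hr
  | cons x t =>
    rw [min?_eq_foldl, List.foldl_cons]
    have hacc : mstep k none x = some x := rfl
    rw [hacc]
    by_cases hx : k x = 0
    · have hrx : x = r := by simpa [List.find?_cons, hx] using hr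
      rw [← hrx]; exact foldl_stay0 k t x hx
    · have hr' : t.find? (fun x => k x == 0) = some r := by
        simpa [List.find?_cons, hx] using hr
      exact foldl_firstZero k t r hr' x hx

-- shifting every key by +1 does not change the fold
lemma foldl_shift (k : String → Nat) (t : List String) :
    ∀ acc, t.foldl (mstep (fun x => k x + 1)) acc = t.foldl (mstep k) acc := by
  induction t with
  | nil => intro acc; rfl
  | cons x t ih =>
    intro acc
    have hst : mstep (fun x => k x + 1) acc x = mstep k acc x := by
      cases acc with
      | none => rfl
      | some m => simp [mstep]
    rw [List.foldl_cons, List.foldl_cons, hst, ih]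

-- fold congruence: keys that agree on the list's members give the same fold
lemma foldl_key_congr (k1 k2 : String → Nat) (t : List String)
    (ht : ∀ x ∈ t, k1 x = k2 x) :
    ∀ acc : Option String, (∀ m, acc = some m → k1 m = k2 m) →
      t.foldl (mstep k1) acc = t.foldl (mstep k2) acc := by
  induction t with
  | nil => intro acc _; rfl
  | cons x t ih =>
    intro acc hacc
    have hx : k1 x = k2 x := ht x (by simp)
    have hst : mstep k1 acc x = mstep k2 acc x := by
      cases acc with
      | none => rfl
      | some m => simp [mstep, hx, hacc m rfl]
    rw [List.foldl_cons, List.foldl_cons, hst]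
    refine ih (fun y hy => ht y (by simp [hy])) _ ?_
    intro m hm
    cases acc with
    | none =>
      have hmx : x = m := by simpa [mstep] using hm
      rw [← hmx]; exact hx
    | some a =>
      simp only [mstep] at hm
      split at hm
      · injection hm with h; rw [← h]; exact hx
      · injection hm with h; rw [← h]; exact hacc a rfl

-- pickInner is find?
lemma pickInner_eq_find? (p : String) (xs : List String) :
    pickInner p xs = xs.find? (fun r => PySem.Str.startswith (PySem.Str.lower r) (PySem.Str.lower p)) := by
  induction xs with
  | nil => rfl
  | cons r rs ih =>
    simp only [pickInner, List.find?_cons]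
    cases h : PySem.Str.startswith (PySem.Str.lower r) (PySem.Str.lower p) <;>
      simp only [h, ih, Bool.false_eq_true, reduceIte]

-- the key on a cons
lemma pickKey_cons (lp : String) (lps : List String) (r : String) :
    pickKey (lp :: lps) r =
      if PySem.Str.startswith (PySem.Str.lower r) lp then 0
      else pickKey lps r + 1 := by
  cases h : PySem.Str.startswith (PySem.Str.lower r) lp with
  | true =>
    simp only [pickKey, List.findIdx?_cons, h, if_true]
  | false =>
    simp only [pickKey, List.findIdx?_cons, h, if_false]
    cases hf : lps.findIdx? (fun q => PySem.Str.startswith (PySem.Str.lower r) q) <;>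
      simp [hf, List.length_cons]

-- zero key on a cons means: the residue matches lp
lemma pickKey_cons_eq_zero (lp : String) (lps : List String) (r : String) :
    (pickKey (lp :: lps) r == 0) = PySem.Str.startswith (PySem.Str.lower r) lp := by
  rw [pickKey_cons]
  cases h : PySem.Str.startswith (PySem.Str.lower r) lp with
  | true => rw [if_pos rfl]; rfl
  | false => rw [if_neg (by simp)]; simp

-- main induction on the prefix list
lemma pick_main (r0 : String) (rs ps : List String) :
    (match pickOuter (r0 :: rs) ps with
     | some r => some r
     | none => some r0) = PySem.List.min? (r0 :: rs) (pickKey (ps.map PySem.Str.lower)) := by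
  induction ps with
  | nil =>
    simp only [pickOuter, List.map_nil]
    rw [min?_eq_foldl]
    show some r0 = rs.foldl (mstep (pickKey [])) (some r0)
    exact (foldl_stay0 (pickKey []) rs r0 rfl).symm
  | cons p ps ih =>
    simp only [pickOuter, List.map_cons]
    cases hin : pickInner p (r0 :: rs) with
    | some r =>
      have hf : (r0 :: rs).find?
          (fun x => pickKey (PySem.Str.lower p :: ps.map PySem.Str.lower) x == 0) = some r := by
        have hpred : (fun x => pickKey (PySem.Str.lower p :: ps.map PySem.Str.lower) x == 0)
            = (fun x => PySem.Str.startswith (PySem.Str.lower x) (PySem.Str.lower p)) := by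
          funext x; exact pickKey_cons_eq_zero (PySem.Str.lower p) (ps.map PySem.Str.lower) x
        rw [hpred, ← pickInner_eq_find?]; exact hin
      exact (min?_firstZero _ (r0 :: rs) r hf).symm
    | none =>
      -- no residue matches p: every key is shifted by one
      have hfind : (r0 :: rs).find?
          (fun x => PySem.Str.startswith (PySem.Str.lower x) (PySem.Str.lower p)) = none := by
        rw [← pickInner_eq_find?]; exact hin
      have hnom := List.find?_eq_none.mp hfind
      have hkeys : ∀ x ∈ (r0 :: rs), pickKey (PySem.Str.lower p :: ps.map PySem.Str.lower) x
          = pickKey (ps.map PySem.Str.lower) x + 1 := by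
        intro x hx
        rw [pickKey_cons, if_neg (hnom x hx)]
      rw [ih, min?_eq_foldl, min?_eq_foldl,
        foldl_key_congr (pickKey (PySem.Str.lower p :: ps.map PySem.Str.lower))
          (fun x => pickKey (ps.map PySem.Str.lower) x + 1) (r0 :: rs) hkeys none
          (fun m hm => by cases hm)]
      show rs.foldl (mstep (pickKey (ps.map PySem.Str.lower))) (some r0)
          = rs.foldl (mstep (fun x => pickKey (ps.map PySem.Str.lower) x + 1)) (some r0)
      exact (foldl_shift (pickKey (ps.map PySem.Str.lower)) rs (some r0)).symm

-- ===== VERDICT (by name: the statement is the Claim_ definition above) =====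
theorem pick_residue_py_spec : Claim_equal_pick_residue_py := by
  intro residues preferred_prefixes _
  unfold Spec_pick_residue_py
  cases residues with
  | nil => rfl
  | cons r0 rs =>
    simp only [pick_residue_py, pick_residue_py_alt]
    exact pick_main r0 rs preferred_prefixes
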